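-- pv_equiv track=rewrite | github.com/shirshak55/nlp-project | test.py | process_caption
-- ===== SOURCE A (Python) =====
-- def process_caption(sd, caption):
--     caption_split = caption.split()
--     processed_caption = caption_split[1:]
--     try:
--         end_index = processed_caption.index('<end>')
--         processed_caption = processed_caption[:end_index]
--     except:
--         pass
--     return " ".join([word for word in processed_caption])
-- ===== SOURCE B (Python) =====
-- def process_caption(sd, caption):
--     # Single-pass state machine over the tokens: builds the output string
--     # directly (no slicing, no index search, no join).
--     out = ""
--     state = 0  # 0: leading token pending, 1: collecting, 2: past '<end>'
--     for w in caption.split():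
--         if state == 0:
--             state = 1
--         elif state == 1:
--             if w == '<end>':
--                 state = 2
--             else:
--                 out += " " + w
--     return out[1:]
-- ===== Notes on version B (the rewrite author's own statement) =====
-- stated objective: alternative
-- what changed: Replaced the staged pipeline (split, slice copy, index search in try/except, slice copy, join) with a single stateful loop over the tokens that builds the output string directly via a 3-state machine, then drops the leading space.
import Mathlib
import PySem

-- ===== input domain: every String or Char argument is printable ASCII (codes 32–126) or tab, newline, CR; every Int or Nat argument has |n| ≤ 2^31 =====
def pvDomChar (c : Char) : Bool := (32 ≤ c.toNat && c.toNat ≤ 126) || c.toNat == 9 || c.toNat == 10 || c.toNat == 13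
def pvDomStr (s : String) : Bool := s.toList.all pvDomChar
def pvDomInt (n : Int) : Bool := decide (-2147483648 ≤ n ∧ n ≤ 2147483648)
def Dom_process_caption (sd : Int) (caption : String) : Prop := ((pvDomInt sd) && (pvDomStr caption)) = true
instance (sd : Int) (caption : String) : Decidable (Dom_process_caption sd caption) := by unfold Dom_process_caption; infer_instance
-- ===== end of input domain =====

-- B replaces A's staged split/slice/index-search/join pipeline with one stateful loop that
-- builds the output string directly (alternative decomposition; same cost).


-- ===== PORT A =====
def process_caption (sd : Int) (caption : String) : String :=
  let caption_split := PySem.Str.split₀ caption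
  let processed_caption := PySem.List.slice caption_split (some 1) none
  let processed_caption :=
    match PySem.List.index? processed_caption "<end>" with
    | some end_index => PySem.List.slice processed_caption none (some (end_index : Int))
    | none => processed_caption
  PySem.Str.join " " (processed_caption.map (fun word => word))

-- ===== PORT B =====
-- one step of Source B's loop body; state = (state, out)
def pcStep (st : Int × String) (w : String) : Int × String :=
  if st.1 == 0 then (1, st.2)
  else if st.1 == 1 then
    (if w == "<end>" then ((2 : Int), st.2) else (st.1, st.2 ++ (" " ++ w)))
  else st

def process_caption_alt (sd : Int) (caption : String) : String :=
  let fin := (PySem.Str.split₀ caption).foldl pcStep (0, "")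
  PySem.Str.slice fin.2 (some 1) none

-- ===== PRECONDITION & SPEC =====
def Spec_process_caption (sd : Int) (caption : String) (out : String) : Prop := out = process_caption_alt sd caption
instance (sd : Int) (caption : String) (out : String) : Decidable (Spec_process_caption sd caption out) := by unfold Spec_process_caption; infer_instance

-- ===== CLAIM (what is proved, stated in full; the proofs are below) =====
def Claim_equal_process_caption : Prop := ∀ (sd : Int) (caption : String), Dom_process_caption sd caption → Spec_process_caption sd caption (process_caption sd caption)

-- ===== LEMMAS AND PROOFS =====

-- once the loop is in state 2, it never changes the accumulator again
theorem pcFold_state2 (ws : List String) (out : String) :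
    ws.foldl pcStep (2, out) = (2, out) := by
  induction ws with
  | nil => rfl
  | cons w ws ih => simpa [pcStep] using ih

-- in state 1 the loop appends " " ++ w for each token up to the first "<end>"
theorem pcFold_state1 (ws : List String) (out : String) :
    ((ws.foldl pcStep (1, out)).2).toList =
      out.toList ++ (ws.takeWhile (fun w => w != "<end>")).flatMap (fun w => ' ' :: w.toList) := by
  induction ws generalizing out with
  | nil => simp
  | cons w ws ih =>
    by_cases hw : w = "<end>"
    · subst hw
      simp [pcStep, List.takeWhile, pcFold_state2]
    · have hb : (w == "<end>") = false := by simpa using hw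
      have hb' : (w != "<end>") = true := by simp [hw]
      simp [pcStep, List.takeWhile, hb, hb', ih]

-- " ".join ws is the concatenation of (' ' :: w) over ws with the leading space dropped
theorem join_space_eq_flatMap_drop (ws : List String) :
    (PySem.Str.join " " ws).toList = (ws.flatMap (fun w => ' ' :: w.toList)).drop 1 := by
  induction ws with
  | nil => simp [PySem.Str.toList_join, PySem.Chars.join_nil]
  | cons p ws ih =>
    cases ws with
    | nil => simp [PySem.Str.toList_join, PySem.Chars.join_singleton]
    | cons q rest =>
      rw [PySem.Str.toList_join] at ih ⊢
      simp only [List.map_cons, PySem.Chars.join_cons_cons, List.flatMap_cons] at ih ⊢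
      rw [ih]
      simp

-- cut-at-first-occurrence equals takeWhile
theorem take_index_eq_takeWhile (l : List String) :
    (match PySem.List.index? l "<end>" with
     | some k => l.take k
     | none => l) = l.takeWhile (fun w => w != "<end>") := by
  induction l with
  | nil => simp [PySem.List.index?_eq_idxOf?]
  | cons x xs ih =>
    simp only [PySem.List.index?_eq_idxOf?, List.idxOf?_cons] at ih ⊢
    by_cases hx : x = "<end>"
    · subst hx; simp [List.takeWhile]
    · simp only [List.takeWhile, show (x == "<end>") = false by simpa using hx,
        show (x != "<end>") = true by simpa using hx]
      cases h : List.idxOf? "<end>" xs with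
      | some k => simp [h] at ih ⊢; simpa using ih
      | none => simp [h] at ih ⊢; simpa using ih

-- ===== VERDICT (by name: the statement is the Claim_ definition above) =====
theorem process_caption_spec : Claim_equal_process_caption := by
  intro sd caption _
  unfold Spec_process_caption process_caption process_caption_alt
  apply String.toList_inj.mp
  simp only [PySem.List.slice_from_one, List.map_id']
  rw [PySem.Str.toList_slice]
  cases hsplit : PySem.Str.split₀ caption with
  | nil =>
    simp [PySem.Chars.slice, PySem.Str.toList_join, PySem.Chars.join_nil, PySem.List.index?_eq_idxOf?, PySem.List.slice_from_one]
  | cons t rest =>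
    have hfold : (t :: rest).foldl pcStep (0, "") = rest.foldl pcStep (1, "") := by
      simp [pcStep]
    rw [hfold]
    have hA :
        (match PySem.List.index? rest "<end>" with
         | some k => PySem.List.slice rest none (some (k : Int))
         | none => rest) = rest.takeWhile (fun w => w != "<end>") := by
      have := take_index_eq_takeWhile rest
      cases h : PySem.List.index? rest "<end>" with
      | some k =>
        rw [h] at this
        simpa [PySem.List.slice_to_natCast] using this
      | none => rw [h] at this; simpa using this
    simp only [List.tail_cons]
    rw [hA, join_space_eq_flatMap_drop]
    rw [show PySem.Chars.slice ((rest.foldl pcStep (1, "")).2).toList (some 1) none =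
          (((rest.foldl pcStep (1, "")).2).toList).tail from by
      simp [PySem.Chars.slice, PySem.List.slice_from_one]]
    rw [pcFold_state1]
    simp [List.drop_one]
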